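-- pv_equiv track=rewrite | github.com/karmaha/Tp2Python | projet2exo1.py | filtrer
-- ===== SOURCE A (Python) =====
-- def filtrer(a, b):
--     # retourne une liste dépourvu d'éléments ayant un facteur premier unique dans l'interval donné
--     facteur = { k : [] for k in range(a, b+1) }
--
--     # calcule des facteur premier de tous les éléments
--     for n in range(a, b+1) :
--         m, i = n, 2
--
--         while i**2 < m+1 :
--             d, r = divmod(m, i)
--
--             if r == 0 :
--                 m = d
--                 facteur[n].append(i)
--             else:
--                 i = i+1
--
--         if m > 1:
--             facteur[n].append(m)
--
--     R = [ i for j in facteur.values() for i in j ]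
--     orphelin, utile = set(), []
--
--     # si le facteur est unique il est enregister dans orphelin
--     for n in set(R) :
--         if R.count(n) == 1 :
--             orphelin.add(n)
--
--     # on ne retiens que les éléments n'ayant aucun des facteurs contenu dans orphelin
--     for n in range(a, b+1) :
--         i = orphelin.intersection( facteur[n] )
--
--         if len(i) == 0 :
--             utile.append(n)
--
--     return utile
-- ===== SOURCE B (Python) =====
-- def filtrer(a, b):
--     # Segmented divisor sweep: instead of trial-dividing each number separately,
--     # sweep each candidate divisor d (2..isqrt(b)) over its multiples in the
--     # range, stripping it from a residual array; leftovers > 1 are prime factors.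
--     size = b - a + 1
--     fact = [[] for _ in range(size)]
--     resid = list(range(a, b + 1))
--     lo = max(a, 2)
--     d = 2
--     while d * d <= b:
--         m = ((lo + d - 1) // d) * d
--         while m <= b:
--             r = resid[m - a]
--             while r % d == 0:
--                 fact[m - a].append(d)
--                 r //= d
--             resid[m - a] = r
--             m += d
--         d += 1
--     final = [fact[i] + ([resid[i]] if resid[i] > 1 else []) for i in range(size)]
--     compte = {}
--     for fs in final:
--         for p in fs:
--             compte[p] = compte.get(p, 0) + 1
--     return [a + i for i in range(size) if all(compte[p] != 1 for p in final[i])]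
-- ===== Notes on version B (the rewrite author's own statement) =====
-- stated objective: alternative
-- what changed: Replaces A's per-number trial division plus the quadratic R.count orphan scan by a segmented divisor sweep: each candidate divisor d with d*d <= b is swept once over its multiples inside [a,b], stripping it from a residual array (leftover residuals > 1 are the remaining prime factors), and a factor-count dict replaces A's orphan-set and per-number set-intersection passes.
import Mathlib
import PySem

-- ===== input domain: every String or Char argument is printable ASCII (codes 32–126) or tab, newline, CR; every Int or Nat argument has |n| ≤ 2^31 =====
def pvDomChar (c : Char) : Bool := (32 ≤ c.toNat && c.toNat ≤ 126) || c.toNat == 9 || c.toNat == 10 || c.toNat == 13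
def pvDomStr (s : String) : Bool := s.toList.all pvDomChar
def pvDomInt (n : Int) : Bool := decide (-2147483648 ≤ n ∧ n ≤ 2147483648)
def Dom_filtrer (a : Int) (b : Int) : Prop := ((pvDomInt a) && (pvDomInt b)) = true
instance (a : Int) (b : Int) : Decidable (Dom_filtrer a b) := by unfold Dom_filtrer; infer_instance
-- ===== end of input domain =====

-- B replaces A's per-number trial division and quadratic orphan scan by a segmented
-- divisor sweep over the range plus a factor-count dict (a different algorithm, same result).

-- ===== PORT A =====
-- A's inner while loop: state (m, i), guard i**2 < m+1; on divmod remainder 0 append i and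
-- divide, else i += 1; after the loop append m if m > 1.  The Nat fuel is a totality guard
-- only: the loop's measure (m + 2 - i) strictly decreases, and the caller supplies fuel
-- exceeding the initial measure, so the 0-fuel branch is never reached.
def pvLoopA : Nat → Int → Int → List Int
  | 0, _, _ => []
  | fuel+1, m, i =>
    if 2 ≤ i ∧ i * i < m + 1 then
      if PySem.Int.mod m i = 0 then i :: pvLoopA fuel (PySem.Int.floordiv m i) i
      else pvLoopA fuel m (i + 1)
    else if 1 < m then [m] else []

def filtrer (a : Int) (b : Int) : List Int :=
  -- facteur = {k: [] for k in range(a,b+1)}, each facteur[n] filled by the while loop above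
  let facteur : PySem.Dict Int (List Int) :=
    (PySem.List.pyRange a (b+1) 1).foldl
      (fun d n => d.insert n (pvLoopA (n+3).toNat n 2)) PySem.Dict.empty
  let R : List Int := facteur.values.flatten
  let orphelin : PySem.Set Int :=
    (PySem.Set.ofList R).foldl
      (fun s n => if PySem.List.count R n = 1 then PySem.Set.add s n else s) PySem.Set.empty
  (PySem.List.pyRange a (b+1) 1).foldl
    (fun utile n =>
      if PySem.Set.len (PySem.Set.inter orphelin (facteur.getD n [])) = 0
      then utile ++ [n] else utile) []

-- ===== PORT B =====
-- B's innermost while: divide out d while r % d == 0, collecting d each time.  Fuel is a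
-- totality guard: r strictly decreases, callers pass fuel > r.
def pvInnerB : Nat → Int → Int → List Int × Int
  | 0, r, _ => ([], r)
  | fuel+1, r, d =>
    if 1 ≤ r ∧ 2 ≤ d ∧ PySem.Int.mod r d = 0 then
      (d :: (pvInnerB fuel (PySem.Int.floordiv r d) d).1,
       (pvInnerB fuel (PySem.Int.floordiv r d) d).2)
    else ([], r)

-- B's middle while: m runs over multiples of d up to b; at each m it strips d from
-- resid[m-a], appending the stripped copies to fact[m-a].  Fuel is a totality guard
-- (m grows by d each turn); the index m-a is in range by construction (a ≤ m ≤ b),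
-- so getD/set transcribe Python's resid[m-a] / fact[m-a] exactly.
def pvMLoopB : Nat → Int → Int → Int → Int → List (List Int) → List Int → List (List Int) × List Int
  | 0, _, _, _, _, fact, resid => (fact, resid)
  | fuel+1, m, bb, aa, d, fact, resid =>
    if m ≤ bb then
      pvMLoopB fuel (m + d) bb aa d
        (fact.set (m - aa).toNat
          (fact.getD (m - aa).toNat [] ++
            (pvInnerB ((resid.getD (m - aa).toNat 0).toNat + 1) (resid.getD (m - aa).toNat 0) d).1))
        (resid.set (m - aa).toNat
          (pvInnerB ((resid.getD (m - aa).toNat 0).toNat + 1) (resid.getD (m - aa).toNat 0) d).2)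
    else (fact, resid)

-- B's outer while: d from 2 while d*d <= b; ((lo+d-1)//d)*d is the first multiple of
-- d that is >= lo.  Fuel is a totality guard (d grows towards sqrt b).
def pvDLoopB : Nat → Int → Int → Int → Int → List (List Int) → List Int → List (List Int) × List Int
  | 0, _, _, _, _, fact, resid => (fact, resid)
  | fuel+1, d, bb, aa, lo, fact, resid =>
    if d * d ≤ bb then
      pvDLoopB fuel (d+1) bb aa lo
        (pvMLoopB ((bb - PySem.Int.floordiv (lo + d - 1) d * d).toNat + 2)
          (PySem.Int.floordiv (lo + d - 1) d * d) bb aa d fact resid).1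
        (pvMLoopB ((bb - PySem.Int.floordiv (lo + d - 1) d * d).toNat + 2)
          (PySem.Int.floordiv (lo + d - 1) d * d) bb aa d fact resid).2
    else (fact, resid)

def filtrer_alt (a : Int) (b : Int) : List Int :=
  let size := b - a + 1
  let fact0 : List (List Int) := (PySem.List.pyRange 0 size 1).map (fun _ => [])
  let resid0 : List Int := PySem.List.pyRange a (b+1) 1
  let lo := max a 2
  let fr := pvDLoopB (b.toNat + 1) 2 b a lo fact0 resid0
  -- final = [fact[i] + ([resid[i]] if resid[i] > 1 else []) for i in range(size)]
  let final : List (List Int) := (PySem.List.pyRange 0 size 1).map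
    (fun i => fr.1.getD i.toNat [] ++
      (if 1 < fr.2.getD i.toNat 0 then [fr.2.getD i.toNat 0] else []))
  let compte : PySem.Dict Int Int :=
    final.foldl (fun c fs => fs.foldl (fun c p => c.insert p (c.getD p 0 + 1)) c)
      PySem.Dict.empty
  ((PySem.List.pyRange 0 size 1).filter
    (fun i => (final.getD i.toNat []).all (fun p => compte.getD p 0 != 1))).map (fun i => a + i)

-- ===== PRECONDITION & SPEC =====
def Spec_filtrer (a : Int) (b : Int) (out : List Int) : Prop := out = filtrer_alt a b
instance (a : Int) (b : Int) (out : List Int) : Decidable (Spec_filtrer a b out) := by unfold Spec_filtrer; infer_instance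

-- ===== CLAIM (what is proved, stated in full; the proofs are below) =====
def Claim_equal_filtrer : Prop := ∀ (a : Int) (b : Int), Dom_filtrer a b → Spec_filtrer a b (filtrer a b)

-- ===== LEMMAS AND PROOFS =====

-- The invariant carried by the trial-division loops: m has no divisor in [2, i)
def pvInv (m i : Int) : Prop := ∀ e : Int, 2 ≤ e → e < i → ¬ e ∣ m

-- Adaptive-bound trial division (guard d*d ≤ current residual): the intermediate
-- characterisation both ports are reduced to.
def pvOuterB : Nat → Int → Int → List Int
  | 0, _, _ => []
  | fuel+1, m, d =>
    if d * d ≤ m then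
      (pvInnerB (m.toNat + 1) m d).1 ++ pvOuterB fuel (pvInnerB (m.toNat + 1) m d).2 (d + 1)
    else if 1 < m then [m] else []

-- What B's sweep does to ONE position: strip every d with d*d ≤ bb from the residual.
def pvPosLoop : Nat → Int → Int → Int → List Int × Int
  | 0, _, _, r => ([], r)
  | fuel+1, d, bb, r =>
    if d * d ≤ bb then
      ((pvInnerB (r.toNat + 1) r d).1 ++
         (pvPosLoop fuel (d+1) bb (pvInnerB (r.toNat + 1) r d).2).1,
       (pvPosLoop fuel (d+1) bb (pvInnerB (r.toNat + 1) r d).2).2)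
    else ([], r)

theorem pvFloordiv_exact (m i : Int) (hdvd : i ∣ m) (hi : (0:Int) < i) :
    PySem.Int.floordiv m i * i = m := by
  have := PySem.Int.floordiv_mul_add_mod m i
  rw [(PySem.Int.mod_eq_zero_iff_dvd m i).2 hdvd] at this
  omega

theorem pvInv_div (m i : Int) (h : pvInv m i) (hdvd : i ∣ m) (hi : 0 < i) :
    pvInv (PySem.Int.floordiv m i) i := by
  intro e he2 hei hedvd
  exact h e he2 hei ((pvFloordiv_exact m i hdvd hi) ▸ Dvd.dvd.mul_right hedvd i)

theorem pvInv_succ (m i : Int) (h : pvInv m i) (hnd : ¬ i ∣ m) : pvInv m (i + 1) := by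
  intro e he2 hei hedvd
  rcases lt_or_eq_of_le (by omega : e ≤ i) with hlt | heq
  · exact h e he2 hlt hedvd
  · exact hnd (heq ▸ hedvd)

-- the innermost loop's final state never exceeds its (nonnegative) input
theorem pvInnerB_snd_le : ∀ (f : Nat) (m d : Int), 0 ≤ m →
    0 ≤ (pvInnerB f m d).2 ∧ (pvInnerB f m d).2 ≤ m := by
  intro f
  induction f with
  | zero => intro m d hm; exact ⟨hm, le_refl m⟩
  | succ f ih =>
    intro m d hm
    rw [pvInnerB]
    split
    · next h =>
      have hd : (0:Int) < d := by omega
      have h1 : 0 ≤ PySem.Int.floordiv m d := by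
        rw [PySem.Int.le_floordiv_iff_mul_le hd]; omega
      have := ih (PySem.Int.floordiv m d) d h1
      have h2 : PySem.Int.floordiv m d < m := by
        rw [PySem.Int.floordiv_lt_iff_lt_mul hd]; nlinarith [h.1, h.2.1]
      exact ⟨this.1, by omega⟩
    · exact ⟨hm, le_refl m⟩

-- the innermost loop's value does not depend on the fuel once it exceeds m
theorem pvInnerB_congr : ∀ (f f' : Nat) (m d : Int), m.toNat < f → m.toNat < f' →
    pvInnerB f m d = pvInnerB f' m d := by
  intro f
  induction f with
  | zero => intro f' m d hf; omega
  | succ f ih =>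
    intro f' m d hf hf'
    cases f' with
    | zero => omega
    | succ f' =>
      rw [pvInnerB, pvInnerB]
      split
      · next h =>
        have hd : (0:Int) < d := by omega
        have h1 : 0 ≤ PySem.Int.floordiv m d := by
          rw [PySem.Int.le_floordiv_iff_mul_le hd]; omega
        have h2 : PySem.Int.floordiv m d < m := by
          rw [PySem.Int.floordiv_lt_iff_lt_mul hd]; nlinarith [h.1, h.2.1]
        rw [ih f' (PySem.Int.floordiv m d) d (by omega) (by omega)]
      · rfl

-- one full unfolding of the innermost loop when d divides m
theorem pvInnerB_step (m d : Int) (hm : 1 ≤ m) (hd : 2 ≤ d) (hdvd : d ∣ m) :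
    pvInnerB (m.toNat + 1) m d
      = (d :: (pvInnerB ((PySem.Int.floordiv m d).toNat + 1) (PySem.Int.floordiv m d) d).1,
         (pvInnerB ((PySem.Int.floordiv m d).toNat + 1) (PySem.Int.floordiv m d) d).2) := by
  have hdpos : (0:Int) < d := by omega
  have hmod : PySem.Int.mod m d = 0 := (PySem.Int.mod_eq_zero_iff_dvd m d).2 hdvd
  have h1 : 0 ≤ PySem.Int.floordiv m d := by
    rw [PySem.Int.le_floordiv_iff_mul_le hdpos]; omega
  have h2 : PySem.Int.floordiv m d < m := by
    rw [PySem.Int.floordiv_lt_iff_lt_mul hdpos]; nlinarith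
  rw [pvInnerB]
  rw [if_pos ⟨hm, hd, hmod⟩]
  rw [pvInnerB_congr m.toNat ((PySem.Int.floordiv m d).toNat + 1) _ d (by omega) (by omega)]

-- the innermost loop does nothing when d does not divide m
theorem pvInnerB_none (f : Nat) (m d : Int) (h : ¬ PySem.Int.mod m d = 0) :
    pvInnerB f m d = ([], m) := by
  cases f with
  | zero => rfl
  | succ f =>
    rw [pvInnerB]
    rw [if_neg (by rintro ⟨-, -, hc⟩; exact h hc)]

-- the innermost loop does nothing from a residual ≤ 1
theorem pvInnerB_of_le_one (f : Nat) (m d : Int) (h : m ≤ 1) : pvInnerB f m d = ([], m) := by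
  cases f with
  | zero => rfl
  | succ f =>
    rw [pvInnerB]
    rw [if_neg ?_]
    rintro ⟨h1, h2, h3⟩
    have hm1 : m = 1 := by omega
    subst hm1
    have := Int.le_of_dvd one_pos ((PySem.Int.mod_eq_zero_iff_dvd 1 d).1 h3)
    omega

-- the innermost loop's output divides its input and stays positive
theorem pvInnerB_dvd : ∀ (f : Nat) (m d : Int),
    (pvInnerB f m d).2 ∣ m ∧ (1 ≤ m → 1 ≤ (pvInnerB f m d).2) := by
  intro f
  induction f with
  | zero => intro m d; exact ⟨dvd_refl m, fun h => h⟩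
  | succ f ih =>
    intro m d
    rw [pvInnerB]
    split
    · next h =>
      have hd : (0:Int) < d := by omega
      have hdvd : d ∣ m := (PySem.Int.mod_eq_zero_iff_dvd m d).1 h.2.2
      have hex := pvFloordiv_exact m d hdvd hd
      have h1 : 1 ≤ PySem.Int.floordiv m d := by
        rw [PySem.Int.le_floordiv_iff_mul_le hd]
        nlinarith [Int.le_of_dvd (by omega : (0:Int) < m) hdvd, h.1]
      have := ih (PySem.Int.floordiv m d) d
      exact ⟨dvd_trans this.1 ⟨d, by omega⟩, fun _ => this.2 h1⟩
    · exact ⟨dvd_refl m, fun h => h⟩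

-- with enough fuel the innermost loop's output is no longer divisible by d
theorem pvInnerB_not_dvd : ∀ (f : Nat) (m d : Int), m.toNat < f → 1 ≤ m → 2 ≤ d →
    ¬ d ∣ (pvInnerB f m d).2 := by
  intro f
  induction f with
  | zero => intro m d hf; omega
  | succ f ih =>
    intro m d hf hm hd
    rw [pvInnerB]
    split
    · next h =>
      have hdpos : (0:Int) < d := by omega
      have hdvd : d ∣ m := (PySem.Int.mod_eq_zero_iff_dvd m d).1 h.2.2
      have hex := pvFloordiv_exact m d hdvd hdpos
      have h1 : 1 ≤ PySem.Int.floordiv m d := by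
        rw [PySem.Int.le_floordiv_iff_mul_le hdpos]
        nlinarith [Int.le_of_dvd (by omega : (0:Int) < m) hdvd]
      have h2 : PySem.Int.floordiv m d < m := by
        rw [PySem.Int.floordiv_lt_iff_lt_mul hdpos]; nlinarith
      exact ih (PySem.Int.floordiv m d) d (by omega) h1 hd
    · next h =>
      intro hc
      exact h ⟨hm, hd, (PySem.Int.mod_eq_zero_iff_dvd m d).2 hc⟩

theorem pvInv_inner (m d : Int) (f : Nat) (hf : m.toNat < f) (hm : 1 ≤ m) (hd : 2 ≤ d)
    (hinv : pvInv m d) : pvInv (pvInnerB f m d).2 (d + 1) := by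
  intro e he2 hei hedvd
  have hdvd : (pvInnerB f m d).2 ∣ m := (pvInnerB_dvd f m d).1
  rcases lt_or_eq_of_le (by omega : e ≤ d) with hlt | heq
  · exact hinv e he2 hlt (dvd_trans hedvd hdvd)
  · exact pvInnerB_not_dvd f m d hf hm hd (heq ▸ hedvd)

-- the adaptive loop's value does not depend on the fuel once it exceeds m + 2 - d
theorem pvOuterB_congr : ∀ (N f f' : Nat) (m d : Int), (m + 2 - d).toNat ≤ N →
    (m + 2 - d).toNat < f → (m + 2 - d).toNat < f' → pvOuterB f m d = pvOuterB f' m d := by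
  intro N
  induction N with
  | zero =>
    intro f f' m d hN hf hf'
    obtain ⟨f, rfl⟩ : ∃ g, f = g + 1 := ⟨f - 1, by omega⟩
    obtain ⟨f', rfl⟩ : ∃ g, f' = g + 1 := ⟨f' - 1, by omega⟩
    rw [pvOuterB, pvOuterB]
    have hg : ¬ d * d ≤ m := by
      intro hc
      have hm0 : 0 ≤ m := le_trans (mul_self_nonneg d) hc
      have : d ≤ m + 1 := by nlinarith
      omega
    rw [if_neg hg, if_neg hg]
  | succ N ih =>
    intro f f' m d hN hf hf'
    obtain ⟨f, rfl⟩ : ∃ g, f = g + 1 := ⟨f - 1, by omega⟩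
    obtain ⟨f', rfl⟩ : ∃ g, f' = g + 1 := ⟨f' - 1, by omega⟩
    rw [pvOuterB, pvOuterB]
    by_cases hg : d * d ≤ m
    · rw [if_pos hg, if_pos hg]
      have hm0 : 0 ≤ m := le_trans (mul_self_nonneg d) hg
      have hdm : d ≤ m + 1 := by nlinarith
      have hsnd := pvInnerB_snd_le (m.toNat + 1) m d hm0
      congr 1
      exact ih f f' ((pvInnerB (m.toNat + 1) m d).2) (d+1) (by omega) (by omega) (by omega)
    · rw [if_neg hg, if_neg hg]

-- below i * i both loops degenerate: A's guard and the adaptive guard fail together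
theorem pvLoopA_base (f : Nat) (m i : Int) (hf : 0 < f) (hg : ¬ (2 ≤ i ∧ i * i < m + 1)) :
    pvLoopA f m i = if 1 < m then [m] else [] := by
  obtain ⟨f, rfl⟩ : ∃ g, f = g + 1 := ⟨f - 1, by omega⟩
  rw [pvLoopA, if_neg hg]

theorem pvOuterB_base (f : Nat) (m i : Int) (hf : 0 < f) (hg : ¬ i * i ≤ m) :
    pvOuterB f m i = if 1 < m then [m] else [] := by
  obtain ⟨f, rfl⟩ : ∃ g, f = g + 1 := ⟨f - 1, by omega⟩
  rw [pvOuterB, if_neg hg]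

-- peel lemma: when i divides m (i² ≤ m) and m has no smaller divisor, the adaptive loop
-- produces i and continues from m/i with the same i (at any sufficient fuel)
theorem pvOuterB_peel (m i : Int) (hi : 2 ≤ i) (him : i * i ≤ m) (hdvd : i ∣ m)
    (hinv : pvInv m i) (fb fb' : Nat) (hfb : (m + 2 - i).toNat < fb)
    (hfb' : (PySem.Int.floordiv m i + 2 - i).toNat < fb') :
    pvOuterB fb m i = i :: pvOuterB fb' (PySem.Int.floordiv m i) i := by
  have hipos : (0:Int) < i := by omega
  have hm4 : 4 ≤ m := by nlinarith
  have him2 : i ≤ m := by nlinarith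
  set m' := PySem.Int.floordiv m i with hm'
  have hm'1 : 1 ≤ m' := by
    rw [hm', PySem.Int.le_floordiv_iff_mul_le hipos]; nlinarith
  have hm'lt : m' < m := by
    rw [hm', PySem.Int.floordiv_lt_iff_lt_mul hipos]; nlinarith
  have hexact : m' * i = m := pvFloordiv_exact m i hdvd hipos
  obtain ⟨f0, rfl⟩ : ∃ g, fb = g + 1 := ⟨fb - 1, by omega⟩
  have hinner : pvInnerB (m.toNat + 1) m i
      = (i :: (pvInnerB (m'.toNat + 1) m' i).1, (pvInnerB (m'.toNat + 1) m' i).2) :=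
    pvInnerB_step m i (by omega) hi hdvd
  rw [pvOuterB, if_pos him, hinner]
  simp only [List.cons_append]
  congr 1
  obtain ⟨f1, rfl⟩ : ∃ g, fb' = g + 1 := ⟨fb' - 1, by omega⟩
  by_cases hg : i * i ≤ m'
  · rw [pvOuterB, if_pos hg]
    have hi' : i ≤ m' := by nlinarith
    have hsnd := pvInnerB_snd_le (m'.toNat + 1) m' i (by omega)
    congr 1
    exact pvOuterB_congr ((pvInnerB (m'.toNat + 1) m' i).2 + 2 - (i+1)).toNat f0 f1 _ (i+1)
      le_rfl (by omega) (by omega)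
  · by_cases hdvd' : i ∣ m'
    · have hile : i ≤ m' := Int.le_of_dvd (by omega) hdvd'
      have hk : PySem.Int.floordiv m' i = 1 := by
        have hkexact : PySem.Int.floordiv m' i * i = m' := pvFloordiv_exact m' i hdvd' hipos
        have hk1 : 1 ≤ PySem.Int.floordiv m' i := by
          rw [PySem.Int.le_floordiv_iff_mul_le hipos]; omega
        by_contra hne
        have hk2 : 2 ≤ PySem.Int.floordiv m' i := by omega
        have hki : PySem.Int.floordiv m' i < i := by nlinarith
        exact hinv _ hk2 hki ⟨i * i, by linear_combination -hexact - i * hkexact⟩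
      have hm'i : m' = i := by
        have h2 := pvFloordiv_exact m' i hdvd' hipos
        rw [hk] at h2; omega
      have hmm1 : ¬ PySem.Int.mod 1 i = 0 := by
        intro hmm
        have hd1 := (PySem.Int.mod_eq_zero_iff_dvd 1 i).1 hmm
        have := Int.le_of_dvd (by omega) hd1
        omega
      have hinner' : pvInnerB (m'.toNat + 1) m' i = ([i], 1) := by
        rw [pvInnerB_step m' i (by omega) hi hdvd', hk]
        rw [pvInnerB_none ((1:Int).toNat + 1) 1 i hmm1]
      have hO1 : pvOuterB f0 1 (i + 1) = [] := by
        have hng : ¬ (i+1) * (i+1) ≤ (1:Int) := by nlinarith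
        rw [pvOuterB_base f0 1 (i+1) (by omega) hng]
        simp
      rw [hinner', pvOuterB_base (f1+1) m' i (by omega) hg, hO1]
      simp [hm'i, show (1:Int) < i from by omega]
    · have hmodne : ¬ PySem.Int.mod m' i = 0 := fun hc =>
        hdvd' ((PySem.Int.mod_eq_zero_iff_dvd m' i).1 hc)
      rw [pvInnerB_none (m'.toNat + 1) m' i hmodne]
      simp only [List.nil_append]
      rw [pvOuterB_base f0 m' (i+1) (by omega) (by nlinarith : ¬ (i+1) * (i+1) ≤ m')]
      rw [pvOuterB_base (f1+1) m' i (by omega) hg]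

-- A's loop equals the adaptive loop, by strong induction on the shared measure
theorem pvLoop_eq_aux : ∀ (N : Nat) (m i : Int) (fa fb : Nat), (m + 2 - i).toNat ≤ N →
    (m + 2 - i).toNat < fa → (m + 2 - i).toNat < fb → 2 ≤ i → pvInv m i →
    pvLoopA fa m i = pvOuterB fb m i := by
  intro N
  induction N with
  | zero =>
    intro m i fa fb hN hfa hfb hi hinv
    have hg1 : ¬ (2 ≤ i ∧ i * i < m + 1) := by
      rintro ⟨h2, hlt⟩
      have : i ≤ m := by nlinarith
      omega
    have hg2 : ¬ i * i ≤ m := by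
      intro hc
      have : i ≤ m := by nlinarith
      omega
    rw [pvLoopA_base fa m i (by omega) hg1, pvOuterB_base fb m i (by omega) hg2]
  | succ N ih =>
    intro m i fa fb hN hfa hfb hi hinv
    by_cases hg : i * i < m + 1
    · have him : i * i ≤ m := by omega
      have hipos : (0:Int) < i := by omega
      have hile : i ≤ m := by nlinarith
      obtain ⟨fa, rfl⟩ : ∃ g, fa = g + 1 := ⟨fa - 1, by omega⟩
      by_cases hmod : PySem.Int.mod m i = 0
      · have hdvd : i ∣ m := (PySem.Int.mod_eq_zero_iff_dvd m i).1 hmod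
        have hm'1 : 1 ≤ PySem.Int.floordiv m i := by
          rw [PySem.Int.le_floordiv_iff_mul_le hipos]; nlinarith
        have hm'lt : PySem.Int.floordiv m i < m := by
          rw [PySem.Int.floordiv_lt_iff_lt_mul hipos]; nlinarith
        have hrec := ih (PySem.Int.floordiv m i) i fa fb (by omega) (by omega) (by omega) hi
          (pvInv_div m i hinv hdvd hipos)
        rw [pvLoopA, if_pos ⟨hi, hg⟩, if_pos hmod, hrec,
          ← pvOuterB_peel m i hi him hdvd hinv fb fb hfb (by omega)]
      · have hinv' : pvInv m (i + 1) := pvInv_succ m i hinv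
          (fun hc => hmod ((PySem.Int.mod_eq_zero_iff_dvd m i).2 hc))
        obtain ⟨fb, rfl⟩ : ∃ g, fb = g + 1 := ⟨fb - 1, by omega⟩
        have hrec := ih m (i+1) fa fb (by omega) (by omega) (by omega) (by omega) hinv'
        rw [pvLoopA, if_pos ⟨hi, hg⟩, if_neg hmod, hrec]
        rw [pvOuterB, if_pos him, pvInnerB_none (m.toNat + 1) m i hmod]
        simp
    · rw [pvLoopA_base fa m i (by omega) (fun h => hg h.2),
        pvOuterB_base fb m i (by omega) (by omega)]

-- the per-position strip loop from a residual ≤ 1 does nothing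
theorem pvPosLoop_of_le_one : ∀ (f : Nat) (d bb r : Int), r ≤ 1 →
    pvPosLoop f d bb r = ([], r) := by
  intro f
  induction f with
  | zero => intro d bb r h; rfl
  | succ f ih =>
    intro d bb r h
    rw [pvPosLoop, pvInnerB_of_le_one _ r d h]
    by_cases hg : d * d ≤ bb
    · rw [if_pos hg]
      simp [ih (d+1) bb r h]
    · rw [if_neg hg]

-- once the residual is below d*d (with no divisor < d) the rest of the sweep only moves
-- the residual (if > 1) to the tail
theorem pvPosLoop_small : ∀ (f : Nat) (d bb r : Int), 2 ≤ d → 1 ≤ r → r < d * d →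
    pvInv r d →
    (pvPosLoop f d bb r).1 ++
      (if 1 < (pvPosLoop f d bb r).2 then [(pvPosLoop f d bb r).2] else [])
      = if 1 < r then [r] else [] := by
  intro f
  induction f with
  | zero => intro d bb r hd hr hlt hinv; simp [pvPosLoop]
  | succ f ih =>
    intro d bb r hd hr hlt hinv
    rw [pvPosLoop]
    by_cases hg : d * d ≤ bb
    · rw [if_pos hg]
      by_cases hdvd : d ∣ r
      · -- the residual IS d (no smaller divisor, below d*d)
        have hdpos : (0:Int) < d := by omega
        have hk1 : 1 ≤ PySem.Int.floordiv r d := by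
          rw [PySem.Int.le_floordiv_iff_mul_le hdpos]
          nlinarith [Int.le_of_dvd (by omega : (0:Int) < r) hdvd]
        have hex := pvFloordiv_exact r d hdvd hdpos
        have hk : PySem.Int.floordiv r d = 1 := by
          by_contra hne
          have hk2 : 2 ≤ PySem.Int.floordiv r d := by omega
          have hki : PySem.Int.floordiv r d < d := by nlinarith
          exact hinv _ hk2 hki ⟨d, by omega⟩
        have hrd : r = d := by rw [hk, one_mul] at hex; omega
        have hinner : pvInnerB (r.toNat + 1) r d = ([d], 1) := by
          rw [pvInnerB_step r d (by omega) hd hdvd, hk, pvInnerB_of_le_one _ 1 d le_rfl]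
        rw [hinner]
        simp only
        rw [pvPosLoop_of_le_one f (d+1) bb 1 le_rfl]
        simp [hrd, show (1:Int) < d from by omega]
      · have hinner : pvInnerB (r.toNat + 1) r d = ([], r) :=
          pvInnerB_none _ r d (fun hc => hdvd ((PySem.Int.mod_eq_zero_iff_dvd r d).1 hc))
        rw [hinner]
        simp only [List.nil_append]
        exact ih (d+1) bb r (by omega) hr (by nlinarith) (pvInv_succ r d hinv hdvd)
    · rw [if_neg hg]
      simp

-- the per-position strip loop plus the final-residual tail equals the adaptive loop
theorem pvPos_eq_pvOuterB : ∀ (N : Nat) (d bb r : Int) (f f' : Nat),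
    (bb + 2 - d).toNat ≤ N → (bb + 2 - d).toNat < f → (r + 2 - d).toNat < f' →
    2 ≤ d → 1 ≤ r → r ≤ bb → pvInv r d →
    (pvPosLoop f d bb r).1 ++
      (if 1 < (pvPosLoop f d bb r).2 then [(pvPosLoop f d bb r).2] else [])
      = pvOuterB f' r d := by
  intro N
  induction N with
  | zero =>
    intro d bb r f f' hN hf hf' hd hr hrb hinv
    have h2d : 2 * d ≤ d * d := by nlinarith
    have hg : ¬ d * d ≤ bb := by omega
    obtain ⟨f, rfl⟩ : ∃ g, f = g + 1 := ⟨f - 1, by omega⟩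
    rw [pvPosLoop, if_neg hg, pvOuterB_base f' r d (by omega) (by omega)]
    simp
  | succ N ih =>
    intro d bb r f f' hN hf hf' hd hr hrb hinv
    by_cases hg : d * d ≤ bb
    · by_cases hgr : d * d ≤ r
      · have hdr : d ≤ r := by nlinarith
        obtain ⟨f, rfl⟩ : ∃ g, f = g + 1 := ⟨f - 1, by omega⟩
        obtain ⟨f', rfl⟩ : ∃ g, f' = g + 1 := ⟨f' - 1, by omega⟩
        rw [pvPosLoop, if_pos hg, pvOuterB, if_pos hgr]
        have hs2 := pvInnerB_snd_le (r.toNat + 1) r d (by omega)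
        have hs1 : 1 ≤ (pvInnerB (r.toNat + 1) r d).2 := (pvInnerB_dvd _ r d).2 hr
        have hinv' := pvInv_inner r d (r.toNat + 1) (by omega) hr hd hinv
        have hdb : d ≤ bb := by nlinarith
        have hrec := ih (d+1) bb (pvInnerB (r.toNat + 1) r d).2 f f' (by omega) (by omega)
          (by omega) (by omega) hs1 (by omega) hinv'
        simp only
        rw [List.append_assoc, hrec]
      · rw [pvOuterB_base f' r d (by omega) hgr]
        exact pvPosLoop_small f d bb r hd hr (by omega) hinv
    · obtain ⟨f, rfl⟩ : ∃ g, f = g + 1 := ⟨f - 1, by omega⟩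
      rw [pvPosLoop, if_neg hg, pvOuterB_base f' r d (by omega) (by omega)]
      simp

-- the per-position sweep result equals A's trial-division list, at the ports' fuels
theorem pvPos_eq_pvLoopA (b n : Int) (hnb : n ≤ b) :
    (pvPosLoop (b.toNat + 1) 2 b n).1 ++
      (if 1 < (pvPosLoop (b.toNat + 1) 2 b n).2 then [(pvPosLoop (b.toNat + 1) 2 b n).2] else [])
      = pvLoopA (n+3).toNat n 2 := by
  by_cases hn : 2 ≤ n
  · have hinv : pvInv n 2 := by intro e he hlt hdvd; omega
    rw [pvPos_eq_pvOuterB (b + 2 - 2).toNat 2 b n (b.toNat + 1) ((n+3).toNat) le_rfl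
      (by omega) (by omega) le_rfl (by omega) hnb hinv]
    exact (pvLoop_eq_aux (n + 2 - 2).toNat n 2 (n+3).toNat (n+3).toNat le_rfl (by omega)
      (by omega) le_rfl hinv).symm
  · rw [pvPosLoop_of_le_one _ 2 b n (by omega)]
    simp only
    rcases Nat.eq_zero_or_pos (n+3).toNat with h0 | hpos
    · rw [h0]
      simp [pvLoopA, show ¬ (1:Int) < n from by omega]
    · rw [pvLoopA_base _ n 2 hpos (by rintro ⟨-, h⟩; omega)]
      simp [show ¬ (1:Int) < n from by omega]

theorem pvGetD_set_self {α : Type} (l : List α) (i : Nat) (v d : α) (h : i < l.length) :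
    (l.set i v).getD i d = v := by
  simp [List.getD_eq_getElem?_getD, h]

theorem pvGetD_set_ne {α : Type} (l : List α) (i j : Nat) (v : α) (d : α) (h : i ≠ j) :
    (l.set i v).getD j d = l.getD j d := by
  simp [List.getD_eq_getElem?_getD, List.getElem?_set_ne h]

-- the middle (multiples-of-d) loop acts on each position independently: positions that
-- are multiples of d counted from m get one strip of d, the rest are untouched
theorem pvMLoopB_spec : ∀ (f : Nat) (m bb aa d : Int) (fact : List (List Int)) (resid : List Int),
    aa ≤ m → 2 ≤ d → (m ≤ bb → (bb - m).toNat < f) →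
    resid.length = (bb - aa + 1).toNat → fact.length = (bb - aa + 1).toNat →
    ((pvMLoopB f m bb aa d fact resid).1.length = (bb - aa + 1).toNat ∧
     (pvMLoopB f m bb aa d fact resid).2.length = (bb - aa + 1).toNat) ∧
    ∀ i : Nat, i < (bb - aa + 1).toNat →
      if m ≤ aa + i ∧ d ∣ (aa + (i:Int) - m) then
        (pvMLoopB f m bb aa d fact resid).1.getD i [] =
            fact.getD i [] ++ (pvInnerB ((resid.getD i 0).toNat + 1) (resid.getD i 0) d).1 ∧
        (pvMLoopB f m bb aa d fact resid).2.getD i 0 =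
            (pvInnerB ((resid.getD i 0).toNat + 1) (resid.getD i 0) d).2
      else
        (pvMLoopB f m bb aa d fact resid).1.getD i [] = fact.getD i [] ∧
        (pvMLoopB f m bb aa d fact resid).2.getD i 0 = resid.getD i 0 := by
  intro f
  induction f with
  | zero =>
    intro m bb aa d fact resid ham hd hf hlr hlf
    by_cases hm : m ≤ bb
    · exact absurd (hf hm) (by omega)
    · refine ⟨⟨hlf, hlr⟩, ?_⟩
      intro i hi
      rw [if_neg (by rintro ⟨h1, -⟩; omega)]
      exact ⟨rfl, rfl⟩
  | succ f ih =>
    intro m bb aa d fact resid ham hd hf hlr hlf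
    rw [pvMLoopB]
    by_cases hm : m ≤ bb
    · rw [if_pos hm]
      have hIH := ih (m + d) bb aa d
        (fact.set (m - aa).toNat
          (fact.getD (m - aa).toNat [] ++
            (pvInnerB ((resid.getD (m - aa).toNat 0).toNat + 1) (resid.getD (m - aa).toNat 0) d).1))
        (resid.set (m - aa).toNat
          (pvInnerB ((resid.getD (m - aa).toNat 0).toNat + 1) (resid.getD (m - aa).toNat 0) d).2)
        (by omega) hd (by intro h; have := hf hm; omega) (by simpa using hlr) (by simpa using hlf)
      obtain ⟨⟨hL1, hL2⟩, hI⟩ := hIH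
      refine ⟨⟨hL1, hL2⟩, ?_⟩
      intro i hi
      have hIi := hI i hi
      by_cases hij : i = (m - aa).toNat
      · -- the position updated at this turn; later turns leave it alone
        have hiaa : aa + (i:Int) = m := by omega
        rw [if_pos ⟨by omega, by rw [show aa + (i:Int) - m = 0 from by omega]; exact dvd_zero d⟩]
        rw [if_neg (by rintro ⟨h1, -⟩; omega)] at hIi
        subst hij
        rw [hIi.1, hIi.2, pvGetD_set_self _ _ _ _ (by omega), pvGetD_set_self _ _ _ _ (by omega)]
        exact ⟨rfl, rfl⟩
      · have hg1 : (fact.set (m - aa).toNat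
            (fact.getD (m - aa).toNat [] ++
              (pvInnerB ((resid.getD (m - aa).toNat 0).toNat + 1) (resid.getD (m - aa).toNat 0) d).1)).getD i []
            = fact.getD i [] := pvGetD_set_ne _ _ _ _ _ (fun h => hij h.symm)
        have hg2 : (resid.set (m - aa).toNat
            (pvInnerB ((resid.getD (m - aa).toNat 0).toNat + 1) (resid.getD (m - aa).toNat 0) d).2).getD i 0
            = resid.getD i 0 := pvGetD_set_ne _ _ _ _ _ (fun h => hij h.symm)
        by_cases hc : m ≤ aa + (i:Int) ∧ d ∣ (aa + (i:Int) - m)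
        · rw [if_pos hc]
          have hne : aa + (i:Int) ≠ m := by omega
          have hge : m + d ≤ aa + (i:Int) := by
            have := Int.le_of_dvd (by omega) hc.2
            omega
          rw [if_pos ⟨hge, by
            have : aa + (i:Int) - (m + d) = (aa + (i:Int) - m) - d := by ring
            rw [this]; exact dvd_sub hc.2 dvd_rfl⟩] at hIi
          rw [hIi.1, hIi.2, hg1, hg2]
          exact ⟨rfl, rfl⟩
        · rw [if_neg hc]
          rw [if_neg (by
            rintro ⟨h1, h2⟩
            exact hc ⟨by omega, by
              have : aa + (i:Int) - m = (aa + (i:Int) - (m + d)) + d := by ring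
              rw [this]; exact dvd_add h2 dvd_rfl⟩)] at hIi
          rw [hIi.1, hIi.2, hg1, hg2]
          exact ⟨rfl, rfl⟩
    · rw [if_neg hm]
      refine ⟨⟨hlf, hlr⟩, ?_⟩
      intro i hi
      rw [if_neg (by rintro ⟨h1, -⟩; omega)]
      exact ⟨rfl, rfl⟩

-- the relation each residual keeps to its position: it divides it (and equals it below 2)
def pvCompat (aa : Int) (i : Nat) (r : Int) : Prop :=
  (2 ≤ aa + (i:Int) → 1 ≤ r ∧ r ∣ (aa + (i:Int))) ∧ (aa + (i:Int) ≤ 1 → r = aa + (i:Int))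

-- the whole sweep acts on each position as the per-position strip loop does
theorem pvDLoopB_spec : ∀ (f : Nat) (d bb aa : Int) (fact : List (List Int)) (resid : List Int),
    2 ≤ d → (bb + 2 - d).toNat < f →
    resid.length = (bb - aa + 1).toNat → fact.length = (bb - aa + 1).toNat →
    (∀ i : Nat, i < (bb - aa + 1).toNat → pvCompat aa i (resid.getD i 0)) →
    ∀ i : Nat, i < (bb - aa + 1).toNat →
      (pvDLoopB f d bb aa (max aa 2) fact resid).1.getD i []
          = fact.getD i [] ++ (pvPosLoop f d bb (resid.getD i 0)).1 ∧
      (pvDLoopB f d bb aa (max aa 2) fact resid).2.getD i 0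
          = (pvPosLoop f d bb (resid.getD i 0)).2 := by
  intro f
  induction f with
  | zero => intro d bb aa fact resid hd hf; omega
  | succ f ih =>
    intro d bb aa fact resid hd hf hlr hlf hcompat i hi
    rw [pvDLoopB, pvPosLoop]
    by_cases hg : d * d ≤ bb
    · rw [if_pos hg, if_pos hg]
      have hdpos : (0:Int) < d := by omega
      have hdb : d ≤ bb := by nlinarith
      have hlo2 : (2:Int) ≤ max aa 2 := le_max_right aa 2
      have hloaa : aa ≤ max aa 2 := le_max_left aa 2
      -- the first multiple of d at or after lo
      have hmodd := PySem.Int.floordiv_mul_add_mod (max aa 2 + d - 1) d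
      have hmnn := PySem.Int.mod_nonneg (max aa 2 + d - 1) hdpos
      have hmlt := PySem.Int.mod_lt (max aa 2 + d - 1) hdpos
      have hm0lo : max aa 2 ≤ PySem.Int.floordiv (max aa 2 + d - 1) d * d := by omega
      have hm0dvd : d ∣ PySem.Int.floordiv (max aa 2 + d - 1) d * d :=
        Dvd.intro_left _ rfl
      have hmin : ∀ n : Int, d ∣ n → max aa 2 ≤ n →
          PySem.Int.floordiv (max aa 2 + d - 1) d * d ≤ n := by
        rintro n ⟨k, rfl⟩ hn
        by_contra hlt
        simp only [not_le] at hlt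
        have hqk : k + 1 ≤ PySem.Int.floordiv (max aa 2 + d - 1) d := by nlinarith
        nlinarith
      have hM := pvMLoopB_spec ((bb - PySem.Int.floordiv (max aa 2 + d - 1) d * d).toNat + 2)
        (PySem.Int.floordiv (max aa 2 + d - 1) d * d) bb aa d fact resid
        (by omega) hd (by intro h; omega) hlr hlf
      obtain ⟨⟨hL1, hL2⟩, hMI⟩ := hM
      have hcompat' : ∀ j : Nat, j < (bb - aa + 1).toNat →
          pvCompat aa j ((pvMLoopB ((bb - PySem.Int.floordiv (max aa 2 + d - 1) d * d).toNat + 2)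
            (PySem.Int.floordiv (max aa 2 + d - 1) d * d) bb aa d fact resid).2.getD j 0) := by
        intro j hj
        have hMj := hMI j hj
        split at hMj
        · next hcnd =>
          rw [hMj.2]
          have hn2 : 2 ≤ aa + (j:Int) := by omega
          have hcj := (hcompat j hj).1 hn2
          constructor
          · intro _
            exact ⟨(pvInnerB_dvd _ _ d).2 hcj.1,
              dvd_trans (pvInnerB_dvd _ _ d).1 hcj.2⟩
          · intro h; omega
        · next hcnd =>
          rw [hMj.2]; exact hcompat j hj
      have hIH := ih (d+1) bb aa _ _ (by omega) (by omega) hL2 hL1 hcompat' i hi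
      have hMi := hMI i hi
      split at hMi
      · next hcnd =>
        -- visited position: one strip of d happened, matching the per-position step
        rw [hIH.1, hIH.2, hMi.1, hMi.2, List.append_assoc]
        exact ⟨rfl, rfl⟩
      · next hcnd =>
        -- untouched position: the per-position step strips nothing either
        have hs : pvInnerB ((resid.getD i 0).toNat + 1) (resid.getD i 0) d = ([], resid.getD i 0) := by
          by_cases hn2 : 2 ≤ aa + (i:Int)
          · have hcj := (hcompat i hi).1 hn2
            have hndvd : ¬ d ∣ resid.getD i 0 := by
              intro hdr
              have hdn : d ∣ aa + (i:Int) := dvd_trans hdr hcj.2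
              exact hcnd ⟨hmin _ hdn (by omega), dvd_sub hdn hm0dvd⟩
            exact pvInnerB_none _ _ d
              (fun hc => hndvd ((PySem.Int.mod_eq_zero_iff_dvd _ d).1 hc))
          · exact pvInnerB_of_le_one _ _ d (by
              have := (hcompat i hi).2 (by omega); omega)
        rw [hIH.1, hIH.2, hMi.1, hMi.2, hs]
        simp
    · rw [if_neg hg, if_neg hg]
      simp

-- membership in A's orphan set
theorem pvMem_orphan_foldl (C : Int → Prop) [DecidablePred C] :
    ∀ (l : List Int) (s : PySem.Set Int) (q : Int),
    (q ∈ l.foldl (fun s n => if C n then PySem.Set.add s n else s) s) ↔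
      (q ∈ s ∨ (q ∈ l ∧ C q)) := by
  intro l
  induction l with
  | nil => simp
  | cons x xs ih =>
    intro s q
    simp only [List.foldl_cons, List.mem_cons]
    rw [ih]
    by_cases hx : C x
    · rw [if_pos hx, PySem.Set.mem_add]
      constructor
      · rintro (⟨h | rfl⟩ | h)
        · exact Or.inl h
        · exact Or.inr ⟨Or.inl rfl, hx⟩
        · exact Or.inr ⟨Or.inr h.1, h.2⟩
      · rintro (h | ⟨rfl | h, hc⟩)
        · exact Or.inl (Or.inl h)
        · exact Or.inl (Or.inr rfl)
        · exact Or.inr ⟨h, hc⟩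
    · rw [if_neg hx]
      constructor
      · rintro (h | h)
        · exact Or.inl h
        · exact Or.inr ⟨Or.inr h.1, h.2⟩
      · rintro (h | ⟨rfl | h, hc⟩)
        · exact Or.inl h
        · exact absurd hc hx
        · exact Or.inr ⟨h, hc⟩

-- B's count dict over a family of factor lists counts occurrences in the flattened list
theorem pvCount_foldl {α : Type} (F : α → List Int) :
    ∀ (l : List α) (c : PySem.Dict Int Int) (p : Int),
    (l.foldl (fun c n => (F n).foldl (fun c p => c.insert p (c.getD p 0 + 1)) c) c).getD p 0 =
      c.getD p 0 + ((l.map F).flatten.count p : Int) := by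
  intro l
  induction l with
  | nil => simp
  | cons x xs ih =>
    intro c p
    simp only [List.foldl_cons, List.map_cons, List.flatten_cons, List.count_append]
    rw [ih, PySem.Dict.getD_foldl_insert_add_one]
    push_cast
    ring

theorem pvSet_inter_len_zero (s t : PySem.Set Int) :
    PySem.Set.len (PySem.Set.inter s t) = 0 ↔ ∀ x ∈ t, x ∉ s := by
  have hlen : PySem.Set.len (PySem.Set.inter s t) = ((PySem.Set.inter s t).length : Int) := rfl
  rw [hlen, Nat.cast_eq_zero, List.length_eq_zero_iff, List.eq_nil_iff_forall_not_mem]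
  constructor
  · intro h x hxt hxs
    exact h x ((PySem.Set.mem_inter s t x).2 ⟨hxs, hxt⟩)
  · intro h x hx
    have hm := (PySem.Set.mem_inter s t x).1 hx
    exact h x hm.2 hm.1

-- A's result-accumulating foldl is a filter
theorem pvFoldl_append_ite (P : Int → Prop) [DecidablePred P] :
    ∀ (l acc : List Int),
      l.foldl (fun acc x => if P x then acc ++ [x] else acc) acc
        = acc ++ l.filter (fun x => decide (P x)) := by
  intro l
  induction l with
  | nil => simp
  | cons x xs ih =>
    intro acc
    simp only [List.foldl_cons, List.filter_cons]
    by_cases hx : P x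
    · rw [if_pos hx, ih]
      simp [hx]
    · rw [if_neg hx, ih]
      simp [hx]

-- ===== VERDICT (by name: the statement is the Claim_ definition above) =====
theorem filtrer_spec : Claim_equal_filtrer := by
  unfold Claim_equal_filtrer
  intro a b _
  unfold Spec_filtrer filtrer filtrer_alt
  simp only []
  set rng := PySem.List.pyRange a (b+1) 1 with hrng
  have hnodup : rng.Nodup := PySem.List.nodup_pyRange_one a (b+1)
  -- A's dict items
  have hitemsA : ((rng.foldl (fun d n => d.insert n (pvLoopA (n+3).toNat n 2)) PySem.Dict.empty)).items
      = rng.map (fun n => (n, pvLoopA (n+3).toNat n 2)) := by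
    have := PySem.Dict.items_foldl_insert_fresh rng (fun n => n)
      (fun n => pvLoopA (n+3).toNat n 2)
      PySem.Dict.empty (by intro a _; rfl) (by simpa using hnodup)
    simpa using this
  have hkeysA : ((rng.foldl (fun d n => d.insert n (pvLoopA (n+3).toNat n 2)) PySem.Dict.empty)).keys.Nodup :=
    PySem.Dict.nodup_keys_foldl_insert rng _ PySem.Dict.empty (by simp)
  have hgetA : ∀ n ∈ rng,
      ((rng.foldl (fun d n => d.insert n (pvLoopA (n+3).toNat n 2)) PySem.Dict.empty)).getD n []
        = pvLoopA (n+3).toNat n 2 := by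
    intro n hn
    exact PySem.Dict.getD_of_mem_items _ (by rw [hitemsA]; exact List.mem_map_of_mem hn) hkeysA []
  have hvalsA : ((rng.foldl (fun d n => d.insert n (pvLoopA (n+3).toNat n 2)) PySem.Dict.empty)).values
      = rng.map (fun n => pvLoopA (n+3).toNat n 2) := by
    show ((rng.foldl (fun d n => d.insert n (pvLoopA (n+3).toNat n 2)) PySem.Dict.empty)).items.map (·.2) = _
    rw [hitemsA, List.map_map]
    rfl
  -- B's sweep, characterised per position
  set F := pvDLoopB (b.toNat + 1) 2 b a (max a 2)
      ((PySem.List.pyRange 0 (b - a + 1) 1).map (fun _ => ([] : List Int)))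
      (PySem.List.pyRange a (b+1) 1) with hF
  have hlen_resid : (PySem.List.pyRange a (b+1) 1).length = (b - a + 1).toNat := by
    rw [PySem.List.length_pyRange_one]; omega
  have hlen_fact : ((PySem.List.pyRange 0 (b - a + 1) 1).map (fun _ => ([] : List Int))).length
      = (b - a + 1).toNat := by
    rw [List.length_map, PySem.List.length_pyRange_one]; omega
  have hresid0 : ∀ i : Nat, i < (b - a + 1).toNat →
      (PySem.List.pyRange a (b+1) 1).getD i 0 = a + i := by
    intro i hi
    have hl : i < (PySem.List.pyRange a (b+1) 1).length := by rw [hlen_resid]; exact hi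
    rw [List.getD_eq_getElem?_getD, List.getElem?_eq_getElem hl,
      PySem.List.getElem_pyRange_one]
    rfl
  have hfact0 : ∀ i : Nat, i < (b - a + 1).toNat →
      ((PySem.List.pyRange 0 (b - a + 1) 1).map (fun _ => ([] : List Int))).getD i [] = [] := by
    intro i hi
    have hl : i < ((PySem.List.pyRange 0 (b - a + 1) 1).map (fun _ => ([] : List Int))).length := by
      rw [hlen_fact]; exact hi
    rw [List.getD_eq_getElem?_getD, List.getElem?_eq_getElem hl, List.getElem_map]
    rfl
  have hcompat : ∀ i : Nat, i < (b - a + 1).toNat →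
      pvCompat a i ((PySem.List.pyRange a (b+1) 1).getD i 0) := by
    intro i hi
    rw [hresid0 i hi]
    exact ⟨fun h => ⟨by omega, dvd_refl _⟩, fun h => rfl⟩
  have hD := pvDLoopB_spec (b.toNat + 1) 2 b a
    ((PySem.List.pyRange 0 (b - a + 1) 1).map (fun _ => ([] : List Int)))
    (PySem.List.pyRange a (b+1) 1) le_rfl (by omega) hlen_resid hlen_fact hcompat
  have hFA : ∀ i : Nat, i < (b - a + 1).toNat →
      F.1.getD i [] ++ (if 1 < F.2.getD i 0 then [F.2.getD i 0] else [])
        = pvLoopA ((a + i) + 3).toNat (a + i) 2 := by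
    intro i hi
    rw [hF, (hD i hi).1, (hD i hi).2, hfact0 i hi, hresid0 i hi, List.nil_append]
    exact pvPos_eq_pvLoopA b (a + i) (by omega)
  -- the comprehension 'final' is the list of A's factor lists
  have hfinal_eq : (PySem.List.pyRange 0 (b - a + 1) 1).map
      (fun i => F.1.getD i.toNat [] ++ (if 1 < F.2.getD i.toNat 0 then [F.2.getD i.toNat 0] else []))
      = rng.map (fun n => pvLoopA (n+3).toNat n 2) := by
    apply List.ext_getElem
    · rw [List.length_map, List.length_map, PySem.List.length_pyRange_one, hrng,
        PySem.List.length_pyRange_one]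
      omega
    · intro i h1 h2
      simp only [List.getElem_map, hrng, PySem.List.getElem_pyRange_one]
      have hi : i < (b - a + 1).toNat := by
        rw [List.length_map, PySem.List.length_pyRange_one] at h1; omega
      have := hFA i hi
      simpa using this
  have hgetFinal : ∀ i : Int, 0 ≤ i → i < b - a + 1 →
      (rng.map (fun n => pvLoopA (n+3).toNat n 2)).getD i.toNat []
        = pvLoopA ((a + i) + 3).toNat (a + i) 2 := by
    intro i h0 hlt
    have hl : i.toNat < (rng.map (fun n => pvLoopA (n+3).toNat n 2)).length := by
      rw [List.length_map, hrng, PySem.List.length_pyRange_one]; omega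
    rw [List.getD_eq_getElem?_getD, List.getElem?_eq_getElem hl]
    simp only [List.getElem_map, hrng, PySem.List.getElem_pyRange_one, Option.getD_some]
    have hnn : ((i.toNat : Int)) = i := by omega
    rw [hnn]
  -- B's count dict counts occurrences in A's flattened factor list
  set R : List Int := ((rng.foldl (fun d n => d.insert n (pvLoopA (n+3).toNat n 2)) PySem.Dict.empty)).values.flatten with hR
  have hRval : R = (rng.map (fun n => pvLoopA (n+3).toNat n 2)).flatten := by rw [hR, hvalsA]
  have hcount : ∀ p : Int,
      ((rng.map (fun n => pvLoopA (n+3).toNat n 2)).foldl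
          (fun c fs => fs.foldl (fun c p => c.insert p (c.getD p 0 + 1)) c)
          PySem.Dict.empty).getD p 0 = (R.count p : Int) := by
    intro p
    have h := pvCount_foldl (fun (fs : List Int) => fs)
      (rng.map (fun n => pvLoopA (n+3).toNat n 2)) PySem.Dict.empty p
    simpa [hRval] using h
  -- A's final foldl is a filter
  rw [pvFoldl_append_ite]
  simp only [List.nil_append]
  -- rewrite B's comprehension to A's factor lists
  rw [hfinal_eq]
  -- move B's map over its filter
  have hidxmap : (PySem.List.pyRange 0 (b - a + 1) 1).map (fun i => a + i) = rng := by
    rw [hrng, PySem.List.pyRange_one, PySem.List.pyRange_one, List.map_map]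
    have : (b + 1 - a).toNat = (b - a + 1 - 0).toNat := by omega
    rw [this]
    apply List.map_congr_left
    intro k _
    simp
  have hswap : ∀ (q p : Int → Bool), (∀ i ∈ PySem.List.pyRange 0 (b - a + 1) 1, q i = p (a + i)) →
      ((PySem.List.pyRange 0 (b - a + 1) 1).filter q).map (fun i => a + i) = rng.filter p := by
    intro q p hqp
    rw [← hidxmap, List.filter_map]
    refine congrArg _ (List.filter_congr ?_)
    intro i hi
    simpa using hqp i hi
  refine Eq.symm (hswap _ _ ?_)
  -- pointwise equality of the two predicates
  intro i hi
  have hmem0 := PySem.List.mem_pyRange_one.1 hi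
  have hmem : a + i ∈ rng := by
    rw [hrng]
    exact PySem.List.mem_pyRange_one.2 ⟨by omega, by omega⟩
  rw [hgetFinal i hmem0.1 hmem0.2, hgetA (a + i) hmem]
  rw [Bool.eq_iff_iff]
  simp only [List.all_eq_true, bne_iff_ne, ne_eq, decide_eq_true_eq]
  rw [pvSet_inter_len_zero]
  have hmemR : ∀ x ∈ pvLoopA ((a + i)+3).toNat (a + i) 2, x ∈ R := by
    intro x hx
    rw [hRval]
    exact List.mem_flatten.2 ⟨pvLoopA ((a + i)+3).toNat (a + i) 2, List.mem_map_of_mem hmem, hx⟩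
  constructor
  · intro h x hx hxo
    rw [pvMem_orphan_foldl (fun q => PySem.List.count R q = 1) (PySem.Set.ofList R)
      PySem.Set.empty x] at hxo
    rcases hxo with hxo | ⟨-, hcnt⟩
    · simp at hxo
    · have hhx := h x hx
      rw [hcount x] at hhx
      rw [PySem.List.count_eq] at hcnt
      omega
  · intro h p hp
    rw [hcount p]
    intro hcnt
    apply h p hp
    rw [pvMem_orphan_foldl (fun q => PySem.List.count R q = 1) (PySem.Set.ofList R)
      PySem.Set.empty p]
    refine Or.inr ⟨(PySem.Set.mem_ofList _ _).2 (hmemR p hp), ?_⟩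
    rw [PySem.List.count_eq]
    omega
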